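-- pv_equiv track=rewrite | github.com/Notion-connect-003/process_mining | app/services/support_helpers.py | suggest_column_name
-- ===== SOURCE A (Python) =====
-- def normalize_header_name(value):
--     return str(value or "").strip()
--
-- def build_header_lookup(headers):
--     exact_lookup = {}
--     casefold_lookup = {}
--
--     for header in headers:
--         normalized_header = normalize_header_name(header)
--         if not normalized_header:
--             continue
--         exact_lookup.setdefault(normalized_header, normalized_header)
--         casefold_lookup.setdefault(normalized_header.casefold(), normalized_header)
--
--     return exact_lookup, casefold_lookup
--
-- def suggest_column_name(headers, field_name, column_candidates, preferred_name=""):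
--     exact_lookup, casefold_lookup = build_header_lookup(headers)
--     requested_name = normalize_header_name(preferred_name)
--
--     if requested_name:
--         exact_match = exact_lookup.get(requested_name)
--         if exact_match:
--             return exact_match
--
--         casefold_match = casefold_lookup.get(requested_name.casefold())
--         if casefold_match:
--             return casefold_match
--
--     for candidate_name in column_candidates.get(field_name, []):
--         normalized_candidate = normalize_header_name(candidate_name)
--         if not normalized_candidate:
--             continue
--
--         exact_match = exact_lookup.get(normalized_candidate)
--         if exact_match:
--             return exact_match
--
--         casefold_match = casefold_lookup.get(normalized_candidate.casefold())
--         if casefold_match: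
--             return casefold_match
--
--     return ""
-- ===== SOURCE B (Python) =====
-- def _first_score(h, hcf, names):
--     # lowest-priority score of header h against the ordered name list:
--     # exact match at index i scores 2*i, casefold match scores 2*i + 1;
--     # the first index that matches already gives the minimum.
--     for i, n in enumerate(names):
--         if h == n:
--             return 2 * i
--         if hcf == n.casefold():
--             return 2 * i + 1
--     return None
--
--
-- def suggest_column_name(headers, field_name, column_candidates, preferred_name=""):
--     # Ordered list of names to try: preferred first, then the field's candidates.
--     names = []
--     requested = str(preferred_name or "").strip()
--     if requested:
--         names.append(requested)
--     for cand in column_candidates.get(field_name, []):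
--         n = str(cand or "").strip()
--         if n:
--             names.append(n)
--
--     # Single pass over the headers: keep the header with the minimal score,
--     # first-in-order on ties (strict '<').
--     best = None  # (score, header)
--     for header in headers:
--         h = str(header or "").strip()
--         if not h:
--             continue
--         s = _first_score(h, h.casefold(), names)
--         if s is not None and (best is None or s < best[0]):
--             best = (s, h)
--     return best[1] if best is not None else ""
-- ===== Notes on version B (the rewrite author's own statement) =====
-- stated objective: alternative
-- what changed: Inverts the traversal: instead of A's per-name dict lookups over precomputed exact/casefold tables, B makes a single argmin pass over the headers, scoring each header against the ordered name list (exact match at index i = 2i, casefold match = 2i+1) and keeping the lowest-scored header, first-in-order on ties.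
import Mathlib
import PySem

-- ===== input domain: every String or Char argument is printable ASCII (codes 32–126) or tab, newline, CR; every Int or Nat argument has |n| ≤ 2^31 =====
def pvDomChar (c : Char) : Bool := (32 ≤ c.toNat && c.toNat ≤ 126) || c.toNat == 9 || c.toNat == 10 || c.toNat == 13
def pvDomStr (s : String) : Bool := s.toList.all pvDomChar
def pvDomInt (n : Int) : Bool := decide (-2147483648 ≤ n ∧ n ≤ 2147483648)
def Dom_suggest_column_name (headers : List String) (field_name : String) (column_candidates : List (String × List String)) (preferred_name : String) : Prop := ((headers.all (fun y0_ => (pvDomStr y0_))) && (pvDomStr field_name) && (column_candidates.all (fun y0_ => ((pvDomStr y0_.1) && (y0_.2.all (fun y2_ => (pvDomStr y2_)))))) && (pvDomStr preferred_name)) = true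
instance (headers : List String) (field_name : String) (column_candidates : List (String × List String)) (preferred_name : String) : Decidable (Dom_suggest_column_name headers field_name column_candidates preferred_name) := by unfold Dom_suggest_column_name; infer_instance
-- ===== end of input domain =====

-- ===== PORT A =====
-- One honest line: B replaces A's name-by-name dict lookups with a single argmin pass over the
-- headers, scoring each header against the ordered name list (exact = 2i, casefold = 2i+1);
-- objective: alternative (inverted traversal), not claimed faster.
-- Python's str.casefold is ported as PySem.Str.lower — exact on the ASCII domain Dom_ states.

-- str(value or "").strip()  (inputs are strings, so 'value or ""' is value unless value = "")
def normalize_header_name (value : String) : String :=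
  PySem.Str.strip (if value = "" then "" else value)

-- build_header_lookup: fold over headers, setdefault into (exact_lookup, casefold_lookup)
def build_header_lookup (headers : List String) :
    PySem.Dict String String × PySem.Dict String String :=
  headers.foldl
    (fun p header =>
      let n := normalize_header_name header
      if n = "" then p
      else (p.1.setdefault n n, p.2.setdefault (PySem.Str.lower n) n))
    (PySem.Dict.empty, PySem.Dict.empty)

-- the per-name body of A: exact_lookup.get, truthiness test, then casefold_lookup.get,
-- truthiness test, else fall through (the two 'return' sites of A, with `fallback` = what follows)
def scn_try2 (cf : PySem.Dict String String) (n fallback : String) : String :=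
  match cf.get? (PySem.Str.lower n) with
  | some m => if m ≠ "" then m else fallback
  | none => fallback

def scn_try (exact cf : PySem.Dict String String) (n fallback : String) : String :=
  match exact.get? n with
  | some m => if m ≠ "" then m else scn_try2 cf n fallback
  | none => scn_try2 cf n fallback

-- the 'for candidate_name in …' loop of A
def scn_loop (exact cf : PySem.Dict String String) : List String → String
  | [] => ""
  | c :: rest =>
    let n := normalize_header_name c
    if n = "" then scn_loop exact cf rest
    else scn_try exact cf n (scn_loop exact cf rest)

def suggest_column_name (headers : List String) (field_name : String) (column_candidates : List (String × List String)) (preferred_name : String) : String :=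
  let lk := build_header_lookup headers
  let requested := normalize_header_name preferred_name
  -- column_candidates.get(field_name, []) on the association list (first match)
  let cands := ((column_candidates.find? (·.1 == field_name)).map (·.2)).getD []
  if requested ≠ "" then scn_try lk.1 lk.2 requested (scn_loop lk.1 lk.2 cands)
  else scn_loop lk.1 lk.2 cands

-- ===== PORT B =====
-- _first_score(h, hcf, names): first matching index i gives 2*i (exact) or 2*i+1 (casefold);
-- the recursion adds 2 per skipped name, computing exactly those values
def first_score (h hcf : String) : List String → Option Nat
  | [] => none
  | n :: rest =>
    if h = n then some 0
    else if hcf = PySem.Str.lower n then some 1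
    else (first_score h hcf rest).map (· + 2)

def suggest_column_name_alt (headers : List String) (field_name : String) (column_candidates : List (String × List String)) (preferred_name : String) : String :=
  let requested := PySem.Str.strip (if preferred_name = "" then "" else preferred_name)
  let cands := ((column_candidates.find? (·.1 == field_name)).map (·.2)).getD []
  let names := (if requested ≠ "" then [requested] else []) ++
      ((cands.map (fun x => PySem.Str.strip (if x = "" then "" else x))).filter (· ≠ ""))
  -- single pass over the headers keeping the best (score, header); strict '<' keeps the first on ties
  let best := headers.foldl
    (fun best header =>
      let h := PySem.Str.strip (if header = "" then "" else header)
      if h = "" then best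
      else
        match first_score h (PySem.Str.lower h) names with
        | none => best
        | some s =>
          match best with
          | none => some (s, h)
          | some b => if s < b.1 then some (s, h) else best)
    none
  match best with
  | some b => b.2
  | none => ""

-- ===== PRECONDITION & SPEC =====
def Spec_suggest_column_name (headers : List String) (field_name : String) (column_candidates : List (String × List String)) (preferred_name : String) (out : String) : Prop := out = suggest_column_name_alt headers field_name column_candidates preferred_name
instance (headers : List String) (field_name : String) (column_candidates : List (String × List String)) (preferred_name : String) (out : String) : Decidable (Spec_suggest_column_name headers field_name column_candidates preferred_name out) := by unfold Spec_suggest_column_name; infer_instance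

-- ===== CLAIM (what is proved, stated in full; the proofs are below) =====
def Claim_equal_suggest_column_name : Prop := ∀ (headers : List String) (field_name : String) (column_candidates : List (String × List String)) (preferred_name : String), Dom_suggest_column_name headers field_name column_candidates preferred_name → Spec_suggest_column_name headers field_name column_candidates preferred_name (suggest_column_name headers field_name column_candidates preferred_name)

-- ===== LEMMAS AND PROOFS =====

-- the normalized, non-empty headers, in order (shared shape of both ports' data)
def normList (hs : List String) : List String :=
  (hs.map normalize_header_name).filter (· ≠ "")

-- the names-outer scan both sides are reduced to: exact scan, else first casefold match, else next name
def scanNames (hs : List String) : List String → String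
  | [] => ""
  | n :: rest =>
    if hs.contains n then n
    else
      match hs.find? (fun h => PySem.Str.lower h == PySem.Str.lower n) with
      | some h => h
      | none => scanNames hs rest

-- ---- Phase 1: A reduces to scanNames ----

theorem get?_setdefault_or (d : PySem.Dict String String) (a v k : String) :
    (d.setdefault a v).get? k = (d.get? k).or (if a = k then some v else none) := by
  by_cases h : a = k
  · subst h
    rw [PySem.Dict.get?_setdefault_self]
    cases d.get? a <;> simp
  · rw [PySem.Dict.get?_setdefault_of_ne d v (show k ≠ a from fun hk => h hk.symm)]
    simp [h]

theorem build_fold_get (hs : List String) :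
    ∀ (d1 d2 : PySem.Dict String String) (k : String),
      ((hs.foldl (fun p header =>
          let n := normalize_header_name header
          if n = "" then p
          else (p.1.setdefault n n, p.2.setdefault (PySem.Str.lower n) n)) (d1, d2)).1.get? k
        = (d1.get? k).or (if (normList hs).contains k then some k else none))
      ∧ ((hs.foldl (fun p header =>
          let n := normalize_header_name header
          if n = "" then p
          else (p.1.setdefault n n, p.2.setdefault (PySem.Str.lower n) n)) (d1, d2)).2.get? k
        = (d2.get? k).or ((normList hs).find? (fun h => PySem.Str.lower h == k))) := by
  induction hs with
  | nil => intro d1 d2 k; simp [normList]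
  | cons h t ih =>
    intro d1 d2 k
    by_cases hn : normalize_header_name h = ""
    · simpa [List.foldl_cons, hn, normList] using ih d1 d2 k
    · have hlist : normList (h :: t) = normalize_header_name h :: normList t := by
        simp [normList, hn]
      have hacc : (let n := normalize_header_name h
            if n = "" then ((d1, d2) : PySem.Dict String String × PySem.Dict String String)
            else ((d1, d2).1.setdefault n n, (d1, d2).2.setdefault (PySem.Str.lower n) n))
          = (d1.setdefault (normalize_header_name h) (normalize_header_name h),
             d2.setdefault (PySem.Str.lower (normalize_header_name h)) (normalize_header_name h)) := by
        simp [hn]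
      constructor
      · rw [List.foldl_cons, hacc, (ih _ _ k).1,
            get?_setdefault_or, Option.or_assoc, hlist]
        by_cases hk : normalize_header_name h = k
        · simp [hk]
        · have hk' : ¬ k = normalize_header_name h := fun hkk => hk hkk.symm
          simp [hk, hk']
      · rw [List.foldl_cons, hacc, (ih _ _ k).2,
            get?_setdefault_or, Option.or_assoc, hlist]
        by_cases hk : PySem.Str.lower (normalize_header_name h) = k
        · simp [hk]
        · simp [hk]

theorem exact_get (headers : List String) (k : String) :
    (build_header_lookup headers).1.get? k
      = (if (normList headers).contains k then some k else none) := by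
  have := (build_fold_get headers PySem.Dict.empty PySem.Dict.empty k).1
  simpa [build_header_lookup] using this

theorem cf_get (headers : List String) (k : String) :
    (build_header_lookup headers).2.get? k
      = (normList headers).find? (fun h => PySem.Str.lower h == k) := by
  have := (build_fold_get headers PySem.Dict.empty PySem.Dict.empty k).2
  simpa [build_header_lookup] using this

theorem mem_normList_ne (hs : List String) (h : String) (hm : h ∈ normList hs) : h ≠ "" := by
  have := List.of_mem_filter hm
  simpa using this

theorem try_eq (headers : List String) (n fallback : String) (hn : n ≠ "") :
    scn_try (build_header_lookup headers).1 (build_header_lookup headers).2 n fallback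
      = (if (normList headers).contains n then n
         else match (normList headers).find? (fun h => PySem.Str.lower h == PySem.Str.lower n) with
              | some h => h
              | none => fallback) := by
  unfold scn_try scn_try2
  rw [exact_get, cf_get]
  by_cases hm : n ∈ normList headers
  · simp [hm, hn]
  · cases hf : (normList headers).find? (fun h => PySem.Str.lower h == PySem.Str.lower n) with
    | none => simp [hm]
    | some h =>
      have hmem : h ∈ normList headers := List.mem_of_find?_eq_some hf
      simp [hm, mem_normList_ne headers h hmem]

theorem loop_eq (headers : List String) (cands : List String) :
    scn_loop (build_header_lookup headers).1 (build_header_lookup headers).2 cands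
      = scanNames (normList headers) ((cands.map normalize_header_name).filter (· ≠ "")) := by
  induction cands with
  | nil => simp [scn_loop, scanNames]
  | cons c rest ih =>
    by_cases hn : normalize_header_name c = ""
    · simpa [scn_loop, hn] using ih
    · rw [show scn_loop (build_header_lookup headers).1 (build_header_lookup headers).2 (c :: rest)
            = scn_try (build_header_lookup headers).1 (build_header_lookup headers).2
                (normalize_header_name c)
                (scn_loop (build_header_lookup headers).1 (build_header_lookup headers).2 rest) by
          simp [scn_loop, hn]]
      rw [try_eq headers _ _ hn, ih]
      have hfl : ((c :: rest).map normalize_header_name).filter (· ≠ "")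
          = normalize_header_name c :: ((rest.map normalize_header_name).filter (· ≠ "")) := by
        simp [hn]
      rw [hfl]
      rfl

-- ---- Phase 2: B's argmin pass reduces to scanNames ----

def optH (names : List String) (h : String) : Option (Nat × String) :=
  (first_score h (PySem.Str.lower h) names).map (fun s => (s, h))

def combine (a b : Option (Nat × String)) : Option (Nat × String) :=
  match a, b with
  | none, b => b
  | some a, none => some a
  | some a, some b => if b.1 < a.1 then some b else some a

def bigOpt (names : List String) : List String → Option (Nat × String)
  | [] => none
  | h :: t => combine (optH names h) (bigOpt names t)

theorem combine_none_right (a : Option (Nat × String)) : combine a none = a := by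
  cases a <;> rfl

theorem combine_some (a b : Nat × String) :
    combine (some a) (some b) = if b.1 < a.1 then some b else some a := rfl

theorem combine_assoc (a b c : Option (Nat × String)) :
    combine (combine a b) c = combine a (combine b c) := by
  cases a with
  | none => rfl
  | some pa =>
    cases b with
    | none => rfl
    | some pb =>
      cases c with
      | none => rw [combine_none_right, combine_none_right]
      | some pc =>
        by_cases h1 : pb.1 < pa.1 <;> by_cases h2 : pc.1 < pb.1 <;> by_cases h3 : pc.1 < pa.1 <;>
          simp [combine_some, h1, h2, h3] <;> omega

theorem step_eq (names : List String) (acc : Option (Nat × String)) (h : String) :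
    (match first_score h (PySem.Str.lower h) names with
     | none => acc
     | some s =>
       match acc with
       | none => some (s, h)
       | some b => if s < b.1 then some (s, h) else acc)
    = combine acc (optH names h) := by
  unfold optH
  cases first_score h (PySem.Str.lower h) names <;> cases acc <;> simp [combine]

theorem foldl_combine (names : List String) (l : List String) :
    ∀ acc, l.foldl (fun a h => combine a (optH names h)) acc = combine acc (bigOpt names l) := by
  induction l with
  | nil => intro acc; simp [bigOpt, combine_none_right]
  | cons h t ih =>
    intro acc
    rw [List.foldl_cons, ih, combine_assoc]
    rfl

-- the port's raw fold (normalize inline, skip empties) is the combine-fold over normList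
theorem raw_fold_eq (names : List String) (headers : List String) :
    ∀ acc,
      headers.foldl
        (fun best header =>
          let h := PySem.Str.strip (if header = "" then "" else header)
          if h = "" then best
          else
            match first_score h (PySem.Str.lower h) names with
            | none => best
            | some s =>
              match best with
              | none => some (s, h)
              | some b => if s < b.1 then some (s, h) else best) acc
      = (normList headers).foldl (fun a h => combine a (optH names h)) acc := by
  induction headers with
  | nil => intro acc; simp [normList]
  | cons x t ih =>
    intro acc
    by_cases hn : normalize_header_name x = ""
    · rw [List.foldl_cons]
      have : normList (x :: t) = normList t := by simp [normList, hn]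
      simp only [this]
      simpa [normalize_header_name] using
        (by simpa [show PySem.Str.strip (if x = "" then "" else x) = normalize_header_name x from rfl, hn] using ih acc)
    · have hl : normList (x :: t) = normalize_header_name x :: normList t := by
        simp [normList, hn]
      rw [List.foldl_cons, hl, List.foldl_cons]
      have hx : PySem.Str.strip (if x = "" then "" else x) = normalize_header_name x := rfl
      simp only [hx, hn, if_false]
      rw [step_eq names acc (normalize_header_name x)]
      exact ih _

theorem bigOpt_nil (hs : List String) : bigOpt [] hs = none := by
  induction hs with
  | nil => rfl
  | cons h t ih => simp [bigOpt, optH, first_score, ih, combine]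

theorem combine_zero (x : String) (b : Option (Nat × String)) :
    combine (some (0, x)) b = some (0, x) := by
  cases b with
  | none => rfl
  | some p => simp [combine]

-- the key decomposition of the argmin over the name list
theorem bigOpt_cons (n : String) (rest : List String) (hs : List String) :
    bigOpt (n :: rest) hs =
      (if hs.contains n then some (0, n)
       else
        match hs.find? (fun h => PySem.Str.lower h == PySem.Str.lower n) with
        | some h0 => some (1, h0)
        | none => (bigOpt rest hs).map (fun p => (p.1 + 2, p.2))) := by
  induction hs with
  | nil => simp [bigOpt]
  | cons h t ih =>
    have hstep : bigOpt (n :: rest) (h :: t) = combine (optH (n :: rest) h) (bigOpt (n :: rest) t) := rfl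
    by_cases he : h = n
    · subst he
      have h1 : optH (h :: rest) h = some (0, h) := by simp [optH, first_score]
      have hcont : (h :: t).contains h = true := by simp
      rw [hstep, h1, combine_zero, hcont]
      simp
    · have hne : (n == h) = false := by simp [Ne.symm he]
      have hcont : (h :: t).contains n = t.contains n := by
        simp
        exact fun hnh => absurd hnh.symm he
      by_cases hcf : PySem.Str.lower h = PySem.Str.lower n
      · have h1 : optH (n :: rest) h = some (1, h) := by
          simp [optH, first_score, he, hcf]
        have hfind : (h :: t).find? (fun x => PySem.Str.lower x == PySem.Str.lower n) = some h := by
          rw [List.find?_cons_of_pos]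
          simpa using hcf
        rw [hstep, h1, ih, hcont, hfind]
        by_cases hc : t.contains n = true
        · rw [if_pos hc, if_pos hc, combine_some]
          norm_num
        · rw [if_neg hc, if_neg hc]
          cases hf : t.find? (fun x => PySem.Str.lower x == PySem.Str.lower n) with
          | some h0 => rw [combine_some]; simp
          | none =>
            cases hb : bigOpt rest t with
            | none => rfl
            | some p => rw [Option.map_some, combine_some]; simp
      · have h1 : optH (n :: rest) h = (optH rest h).map (fun p => (p.1 + 2, p.2)) := by
          simp only [optH, first_score, he, if_false, hcf]
          cases first_score h (PySem.Str.lower h) rest <;> rfl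
        have hfind : (h :: t).find? (fun x => PySem.Str.lower x == PySem.Str.lower n)
            = t.find? (fun x => PySem.Str.lower x == PySem.Str.lower n) := by
          rw [List.find?_cons_of_neg]
          simpa using hcf
        rw [hstep, h1, ih, hcont, hfind]
        by_cases hc : t.contains n = true
        · rw [if_pos hc, if_pos hc]
          cases optH rest h with
          | none => rfl
          | some p => rw [Option.map_some, combine_some]; simp
        · rw [if_neg hc, if_neg hc]
          cases hf : t.find? (fun x => PySem.Str.lower x == PySem.Str.lower n) with
          | some h0 =>
            cases optH rest h with
            | none => rfl
            | some p => rw [Option.map_some, combine_some]; simp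
          | none =>
            rw [show bigOpt rest (h :: t) = combine (optH rest h) (bigOpt rest t) from rfl]
            cases optH rest h <;> cases bigOpt rest t <;>
              simp [combine] <;> split_ifs <;> simp_all

theorem scan_eq_big (names : List String) (hs : List String) :
    scanNames hs names = (match bigOpt names hs with | some p => p.2 | none => "") := by
  induction names with
  | nil => simp [scanNames, bigOpt_nil]
  | cons n rest ih =>
    have hscan : scanNames hs (n :: rest)
        = (if hs.contains n then n
           else
            match hs.find? (fun h => PySem.Str.lower h == PySem.Str.lower n) with
            | some h => h
            | none => scanNames hs rest) := rfl
    rw [hscan, bigOpt_cons]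
    by_cases hc : hs.contains n = true
    · rw [if_pos hc, if_pos hc]
    · rw [if_neg hc, if_neg hc]
      cases hf : hs.find? (fun h => PySem.Str.lower h == PySem.Str.lower n) with
      | some h0 => rfl
      | none =>
        rw [ih]
        cases bigOpt rest hs <;> rfl

-- ===== VERDICT (by name: the statement is the Claim_ definition above) =====
theorem suggest_column_name_spec : Claim_equal_suggest_column_name := by
  intro headers field_name column_candidates preferred_name _
  unfold Spec_suggest_column_name
  show suggest_column_name headers field_name column_candidates preferred_name
      = suggest_column_name_alt headers field_name column_candidates preferred_name
  simp only [suggest_column_name, suggest_column_name_alt]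
  rw [show (fun x => PySem.Str.strip (if x = "" then "" else x)) = normalize_header_name from rfl]
  rw [show PySem.Str.strip (if preferred_name = "" then "" else preferred_name)
        = normalize_header_name preferred_name from rfl]
  rw [raw_fold_eq, foldl_combine,
      show ∀ x, combine none x = x from fun _ => rfl, ← scan_eq_big]
  by_cases hr : normalize_header_name preferred_name = ""
  · simp only [hr, ne_eq, not_true_eq_false, if_false]
    rw [loop_eq]
    simp
  · simp only [hr, ne_eq, not_false_iff, if_true]
    rw [try_eq headers _ _ hr, loop_eq]
    rfl
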